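-- pv_equiv track=rewrite | github.com/speter00/KPMG | exercise_1.py | cube_towers_surface
-- ===== SOURCE A (Python) =====
-- from typing import List
--
-- class Cube:
--     """
--     Class for the Cubes in the towers. It's for easily keeping track of which sides are covered,
--     and by extension, how many sides are not covered.
--     """
--
--     def __init__(self, top_covered=False, bottom_covered=False, right_covered=False, left_covered=False):
--         self._top_covered = top_covered
--         self._bottom_covered = bottom_covered
--         self._right_covered = right_covered
--         self._left_covered = left_covered
--
--         # number of sides not covered
--         self._open_sides = 6 - int(top_covered) - int(bottom_covered) - int(right_covered) - int(left_covered)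
--
--     @property
--     def top_covered(self):
--         return self._top_covered
--
--     # everytime we change whether a side is covered, the number of open_sides must be refreshed
--
--     @top_covered.setter
--     def top_covered(self, covered):
--         self._top_covered = covered
--         self._open_sides = 6 - int(self.top_covered) - int(self.bottom_covered) - int(
--             self.right_covered) - int(self.left_covered)
--
--     @property
--     def bottom_covered(self):
--         return self._bottom_covered
--
--     @bottom_covered.setter
--     def bottom_covered(self, covered):
--         self._bottom_covered = covered
--         self._open_sides = 6 - int(self.top_covered) - int(self.bottom_covered) - int(
--             self.right_covered) - int(self.left_covered)
--
--     @property
--     def right_covered(self):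
--         return self._right_covered
--
--     @right_covered.setter
--     def right_covered(self, covered):
--         self._right_covered = covered
--         self._open_sides = 6 - int(self.top_covered) - int(self.bottom_covered) - int(
--             self.right_covered) - int(self.left_covered)
--
--     @property
--     def left_covered(self):
--         return self._left_covered
--
--     @left_covered.setter
--     def left_covered(self, covered):
--         self._left_covered = covered
--         self._open_sides = 6 - int(self.top_covered) - int(self.bottom_covered) - int(
--             self.right_covered) - int(self.left_covered)
--
--     @property
--     def open_sides(self):
--         return self._open_sides
--
-- def cube_towers_surface(heights: List[int]) -> int:
--     """
--     Function for Exercise 1. This function returns the surface area of connected towers of cubes.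
--
--     :param heights: the heights of the cube towers
--     :return: the surface area of the towers
--     """
--
--     surface = 0  # surface area to return
--     for i in range(len(heights)):
--         for cube in range(1, heights[i] + 1):  # cube 1 is the bottom cube, cube heights[i] is the top cube
--             inspected_cube = Cube()
--             if cube > 1:  # if cube isn't the bottom cube
--                 inspected_cube.bottom_covered = True
--             if cube < heights[i]:  # if cube isn't the top cube
--                 inspected_cube.top_covered = True
--             if i > 0:  # if tower isn't the leftmost tower, inspect left side
--                 if heights[i - 1] >= cube:  # if the left tower's top cube is higher (or level) than the current cube,
--                     # there must be a cube to the left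
--
--                     inspected_cube.left_covered = True
--             if i < len(heights) - 1:  # if tower isn't the rightmost tower, inspect right side
--                 if heights[i + 1] >= cube:  # same idea as with the left side check
--                     inspected_cube.right_covered = True
--             surface += inspected_cube.open_sides
--
--     return surface
-- ===== SOURCE B (Python) =====
-- from typing import List
--
-- def cube_towers_surface(heights: List[int]) -> int:
--     """Closed-form per tower: 4*h + 2 minus the faces hidden by each neighbor."""
--     n = len(heights)
--     total = 0
--     for i in range(n):
--         h = heights[i]
--         if h <= 0:
--             continue
--         left = min(h, max(heights[i - 1], 0)) if i > 0 else 0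
--         right = min(h, max(heights[i + 1], 0)) if i < n - 1 else 0
--         total += 4 * h + 2 - left - right
--     return total
-- ===== Notes on version B (the rewrite author's own statement) =====
-- stated objective: faster
-- what changed: Replaces A's per-cube simulation (inspecting every cube of every tower) with a closed-form per-tower contribution 4*h + 2 - min(h, left) - min(h, right), one O(1) step per tower.
import Mathlib
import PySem

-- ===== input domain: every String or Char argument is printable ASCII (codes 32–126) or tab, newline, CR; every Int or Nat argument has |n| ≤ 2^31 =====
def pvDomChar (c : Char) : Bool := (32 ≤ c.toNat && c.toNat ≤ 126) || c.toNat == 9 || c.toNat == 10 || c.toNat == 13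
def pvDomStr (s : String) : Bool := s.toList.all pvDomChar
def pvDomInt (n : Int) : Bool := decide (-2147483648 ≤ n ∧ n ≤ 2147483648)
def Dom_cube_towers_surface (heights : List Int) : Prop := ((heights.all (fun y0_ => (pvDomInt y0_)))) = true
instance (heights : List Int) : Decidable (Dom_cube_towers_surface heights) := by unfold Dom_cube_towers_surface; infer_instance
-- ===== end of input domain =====

-- B computes each tower's contribution in closed form (4*h + 2 minus faces hidden by the
-- neighbors) instead of A's per-cube simulation: O(n) instead of O(sum of heights).

-- ===== PORT A =====
-- per-cube open sides, as A's Cube class computes them (6 minus one per covered side)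
def cube_towers_surface (heights : List Int) : Int :=
  (PySem.List.pyRange 0 heights.length 1).foldl (fun surface i =>
    (PySem.List.pyRange 1 (PySem.List.pyGetD heights i 0 + 1) 1).foldl (fun s cube =>
      s + (6 - (if 1 < cube then 1 else 0)
             - (if cube < PySem.List.pyGetD heights i 0 then 1 else 0)
             - (if 0 < i ∧ PySem.List.pyGetD heights (i - 1) 0 ≥ cube then 1 else 0)
             - (if i < (heights.length : Int) - 1 ∧ PySem.List.pyGetD heights (i + 1) 0 ≥ cube then 1 else 0)))
      surface) 0

-- ===== PORT B =====
def cube_towers_surface_alt (heights : List Int) : Int :=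
  (PySem.List.pyRange 0 heights.length 1).foldl (fun total i =>
    let h := PySem.List.pyGetD heights i 0
    if h ≤ 0 then total
    else
      let left := if 0 < i then min h (max (PySem.List.pyGetD heights (i - 1) 0) 0) else 0
      let right := if i < (heights.length : Int) - 1 then min h (max (PySem.List.pyGetD heights (i + 1) 0) 0) else 0
      total + (4 * h + 2 - left - right)) 0

-- ===== PRECONDITION & SPEC =====
def Spec_cube_towers_surface (heights : List Int) (out : Int) : Prop := out = cube_towers_surface_alt heights
instance (heights : List Int) (out : Int) : Decidable (Spec_cube_towers_surface heights out) := by unfold Spec_cube_towers_surface; infer_instance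

-- ===== CLAIM (what is proved, stated in full; the proofs are below) =====
def Claim_equal_cube_towers_surface : Prop := ∀ (heights : List Int), Dom_cube_towers_surface heights → Spec_cube_towers_surface heights (cube_towers_surface heights)

-- ===== LEMMAS AND PROOFS =====

-- count of c in 1..k with t ≥ c
lemma pv_cnt_ge (t : Int) (k : Nat) :
    ((PySem.List.pyRange 1 ((k : Int) + 1) 1).map (fun c => if t ≥ c then (1 : Int) else 0)).sum
      = min (k : Int) (max t 0) := by
  induction k with
  | zero => simp [PySem.List.pyRange_one_eq_nil]
  | succ k ih =>
      push_cast
      rw [PySem.List.pyRange_one_succ_right (by omega)]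
      simp only [List.map_append, List.sum_append, List.map_cons, List.map_nil, List.sum_cons,
        List.sum_nil]
      rw [ih]
      split_ifs with h <;> omega

-- count of c in 1..k with c < t
lemma pv_cnt_lt (t : Int) (k : Nat) :
    ((PySem.List.pyRange 1 ((k : Int) + 1) 1).map (fun c => if c < t then (1 : Int) else 0)).sum
      = min (k : Int) (max (t - 1) 0) := by
  induction k with
  | zero => simp [PySem.List.pyRange_one_eq_nil]
  | succ k ih =>
      push_cast
      rw [PySem.List.pyRange_one_succ_right (by omega)]
      simp only [List.map_append, List.sum_append, List.map_cons, List.map_nil, List.sum_cons,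
        List.sum_nil]
      rw [ih]
      split_ifs with h <;> omega

-- count of c in 1..k with 1 < c
lemma pv_cnt_gt1 (k : Nat) :
    ((PySem.List.pyRange 1 ((k : Int) + 1) 1).map (fun c => if 1 < c then (1 : Int) else 0)).sum
      = max ((k : Int) - 1) 0 := by
  induction k with
  | zero => simp [PySem.List.pyRange_one_eq_nil]
  | succ k ih =>
      push_cast
      rw [PySem.List.pyRange_one_succ_right (by omega)]
      simp only [List.map_append, List.sum_append, List.map_cons, List.map_nil, List.sum_cons,
        List.sum_nil]
      rw [ih]
      split_ifs with h <;> omega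

-- split a sum of differences into component sums
lemma pv_sum_body (l : List Int) (a b d e : Int → Int) :
    (l.map (fun c => 6 - a c - b c - d c - e c)).sum
      = 6 * l.length - (l.map a).sum - (l.map b).sum - (l.map d).sum - (l.map e).sum := by
  induction l with
  | nil => simp
  | cons x xs ih => simp only [List.map_cons, List.sum_cons, ih, List.length_cons]; push_cast; ring

-- a guarded 0/1 indicator sum
lemma pv_sum_guard (P : Prop) [Decidable P] (t : Int) (k : Nat) :
    ((PySem.List.pyRange 1 ((k : Int) + 1) 1).map (fun c => if P ∧ t ≥ c then (1 : Int) else 0)).sum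
      = if P then min (k : Int) (max t 0) else 0 := by
  by_cases hP : P
  · simp only [hP, true_and, if_true]; exact pv_cnt_ge t k
  · simp [hP]

-- the per-tower inner loop of A equals B's closed form
lemma pv_inner (P Q : Prop) [Decidable P] [Decidable Q] (h prev next acc : Int) :
    (PySem.List.pyRange 1 (h + 1) 1).foldl (fun s cube =>
        s + (6 - (if 1 < cube then 1 else 0)
               - (if cube < h then 1 else 0)
               - (if P ∧ prev ≥ cube then 1 else 0)
               - (if Q ∧ next ≥ cube then 1 else 0))) acc
      = if h ≤ 0 then acc
        else acc + (4 * h + 2 - (if P then min h (max prev 0) else 0)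
                              - (if Q then min h (max next 0) else 0)) := by
  by_cases hh : h ≤ 0
  · rw [PySem.List.pyRange_one_eq_nil (by omega)]; simp [hh]
  · have hk : h = ((h.toNat : Nat) : Int) := by omega
    rw [PySem.List.foldl_add]
    rw [if_neg hh]
    rw [hk, pv_sum_body]
    rw [pv_cnt_gt1, pv_cnt_lt, pv_sum_guard, pv_sum_guard,
        PySem.List.length_pyRange_one]
    split_ifs <;> omega

-- ===== VERDICT (by name: the statement is the Claim_ definition above) =====
theorem cube_towers_surface_spec : Claim_equal_cube_towers_surface := by
  intro heights _
  unfold Spec_cube_towers_surface cube_towers_surface cube_towers_surface_alt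
  apply PySem.List.foldl_congr_mem
  intro acc i _
  rw [pv_inner]
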